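-- pv_equiv track=rewrite | github.com/Yoo-su/python-algorithm | 스택,큐/스택,큐_중복문자제거.py | solution
-- ===== SOURCE A (Python) =====
-- from collections import Counter
--
-- def solution(s:str):
--     counter,seen,stack=Counter(s),set(), []
--
--     for char in s:
--         #문자 카운트 하나 감소시켜주고, 문자가 이미 등장한 거면 continue
--         counter[char]-=1
--         if char in seen:
--             continue
--
--         #뒤에 붙일 문자가 남아있으면  스택에서 제거
--         while stack and char<stack[-1] and counter[stack[-1]]>0:
--             seen.remove(stack.pop())
--         stack.append(char)
--         seen.add(char)
--
--     return ''.join(stack)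
-- ===== SOURCE B (Python) =====
-- def solution(s: str):
--     # recursive greedy: pick leftmost smallest char in the prefix ending at the
--     # first character with no later occurrence, then recurse on the remainder
--     # with that char removed
--     if not s:
--         return ''
--     best = 0
--     for i, ch in enumerate(s):
--         if ch < s[best]:
--             best = i
--         if ch not in s[i+1:]:
--             break
--     c = s[best]
--     return c + solution(s[best+1:].replace(c, ''))
-- ===== Notes on version B (the rewrite author's own statement) =====
-- stated objective: alternative
-- what changed: Replaces the monotonic stack with Counter and seen-set by a recursive greedy selection: scan for the leftmost smallest character up to the first character with no later occurrence, emit it, and recurse on the remaining suffix with that character removed.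
import Mathlib
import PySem

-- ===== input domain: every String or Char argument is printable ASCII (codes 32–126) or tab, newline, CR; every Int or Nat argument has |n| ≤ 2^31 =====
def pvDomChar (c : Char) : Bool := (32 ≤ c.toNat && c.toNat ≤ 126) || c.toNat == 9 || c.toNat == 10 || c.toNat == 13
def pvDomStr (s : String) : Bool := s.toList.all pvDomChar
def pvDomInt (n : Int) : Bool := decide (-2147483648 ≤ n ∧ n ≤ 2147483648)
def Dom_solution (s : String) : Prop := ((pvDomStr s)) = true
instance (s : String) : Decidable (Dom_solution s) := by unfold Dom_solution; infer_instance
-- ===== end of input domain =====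

-- B re-implements the duplicate-letter removal by recursive greedy selection
-- (pick the leftmost smallest char up to the first char with no later
-- occurrence, then recurse) instead of A's monotonic stack; objective: alternative.


-- ===== PORT A =====
-- the stack is kept with its TOP AT THE HEAD (Python appends/pops at the end),
-- so ''.join(stack) is String.ofList of the reverse.
-- the inner while loop: pop while stack nonempty, char < stack[-1], counter[stack[-1]] > 0;
-- seen.remove(stack.pop()): the popped element is always in seen, so remove = discard (no KeyError).
def aPop (ch : Char) (cnt : PySem.Dict Char Int) :
    PySem.Set Char → List Char → PySem.Set Char × List Char
  | seen, [] => (seen, [])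
  | seen, top :: st =>
      if ch < top ∧ cnt.getD top 0 > 0 then
        aPop ch cnt (PySem.Set.discard seen top) st
      else (seen, top :: st)

-- one iteration of 'for char in s': counter[char] -= 1 (Counter: missing key reads 0);
-- if char in seen: continue; else pop loop, push char, seen.add(char)
def aStep (st : PySem.Dict Char Int × PySem.Set Char × List Char) (ch : Char) :
    PySem.Dict Char Int × PySem.Set Char × List Char :=
  let cnt := st.1.insert ch (st.1.getD ch 0 - 1)
  if PySem.Set.contains st.2.1 ch then (cnt, st.2.1, st.2.2)
  else
    let ps := aPop ch cnt st.2.1 st.2.2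
    (cnt, PySem.Set.add ps.1 ch, ch :: ps.2)

def solution (s : String) : String :=
  let l := s.toList
  let fin := l.foldl aStep (PySem.Dict.counter l, (PySem.Set.empty : PySem.Set Char), ([] : List Char))
  String.ofList fin.2.2.reverse

-- ===== PORT B =====
-- the selection loop of Source B: scan with index i, keep (bestChar, bestIdx);
-- 'ch not in s[i+1:]' is 'ch ∉ rest'; break by returning.
def bSel : List Char → Char → Nat → Nat → Char × Nat
  | [], bc, bi, _ => (bc, bi)
  | ch :: rest, bc, bi, i =>
      let bp := if ch < bc then (ch, i) else (bc, bi)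
      if ch ∈ rest then bSel rest bp.1 bp.2 (i + 1) else bp

-- s[best+1:].replace(c, '') = drop (best+1) then remove every occurrence of the char c
def bRec (l : List Char) : List Char :=
  match l with
  | [] => []
  | a :: t =>
      let cp := bSel (a :: t) a 0 0
      cp.1 :: bRec ((t.drop cp.2).filter (fun x => x ≠ cp.1))
termination_by l.length
decreasing_by
  simp only [List.length_cons]
  exact Nat.lt_succ_of_le (le_trans (List.length_filter_le _ _) (by simp))

def solution_alt (s : String) : String := String.ofList (bRec s.toList)

-- ===== PRECONDITION & SPEC =====
def Spec_solution (s : String) (out : String) : Prop := out = solution_alt s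
instance (s : String) (out : String) : Decidable (Spec_solution s out) := by unfold Spec_solution; infer_instance

-- ===== CLAIM (what is proved, stated in full; the proofs are below) =====
def Claim_equal_solution : Prop := ∀ (s : String), Dom_solution s → Spec_solution s (solution s)

-- ===== LEMMAS AND PROOFS =====

-- abstract version of A's stack loop: the counter is replaced by "occurs in the
-- remaining suffix", the seen set by membership in the stack (top at head)
def mPop (ch : Char) (rest : List Char) : List Char → List Char
  | [] => []
  | top :: st => if ch < top ∧ top ∈ rest then mPop ch rest st else top :: st

def mRun : List Char → List Char → List Char
  | [], st => st
  | ch :: rest, st => if ch ∈ st then mRun rest st else mRun rest (ch :: mPop ch rest st)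

lemma mPop_sublist (ch : Char) (rest : List Char) (st : List Char) :
    (mPop ch rest st).Sublist st := by
  induction st with
  | nil => simp [mPop]
  | cons top st ih =>
      simp only [mPop]
      split
      · exact ih.trans (List.sublist_cons_self _ _)
      · exact List.Sublist.refl _

-- ----- A's fold equals the abstract run -----
lemma aPop_eq (ch : Char) (cnt : PySem.Dict Char Int) (rest : List Char)
    (st : List Char) (seen : PySem.Set Char)
    (hc : ∀ c, cnt.getD c 0 = (rest.count c : Int))
    (hs : ∀ x, x ∈ seen ↔ x ∈ st) (hn : st.Nodup) :
    (aPop ch cnt seen st).2 = mPop ch rest st ∧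
      (∀ x, x ∈ (aPop ch cnt seen st).1 ↔ x ∈ mPop ch rest st) := by
  induction st generalizing seen with
  | nil => simpa [aPop, mPop] using hs
  | cons top st ih =>
      have hcond : (ch < top ∧ cnt.getD top 0 > 0) ↔ (ch < top ∧ top ∈ rest) := by
        rw [hc top]
        constructor
        · rintro ⟨h1, h2⟩
          exact ⟨h1, List.count_pos_iff.mp (by exact_mod_cast h2)⟩
        · rintro ⟨h1, h2⟩
          exact ⟨h1, by exact_mod_cast List.count_pos_iff.mpr h2⟩
      simp only [aPop, mPop]
      by_cases h : ch < top ∧ top ∈ rest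
      · rw [if_pos (hcond.mpr h), if_pos h]
        apply ih
        · intro x
          rw [PySem.Set.mem_discard]
          constructor
          · rintro ⟨hx, hne⟩
            rcases List.mem_cons.mp ((hs x).mp hx) with rfl | h'
            · exact absurd rfl hne
            · exact h'
          · intro hx
            refine ⟨(hs x).mpr (List.mem_cons_of_mem _ hx), ?_⟩
            rintro rfl
            exact (List.nodup_cons.mp hn).1 hx
        · exact (List.nodup_cons.mp hn).2
      · rw [if_neg (fun hh => h (hcond.mp hh)), if_neg h]
        exact ⟨rfl, hs⟩

lemma fold_eq (l : List Char) (cnt : PySem.Dict Char Int) (seen : PySem.Set Char)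
    (st : List Char)
    (hc : ∀ c, cnt.getD c 0 = (l.count c : Int))
    (hs : ∀ x, x ∈ seen ↔ x ∈ st) (hn : st.Nodup) :
    (l.foldl aStep (cnt, seen, st)).2.2 = mRun l st := by
  induction l generalizing cnt seen st with
  | nil => simp [mRun]
  | cons ch rest ih =>
      simp only [List.foldl_cons, mRun]
      have hc' : ∀ c, (cnt.insert ch (cnt.getD ch 0 - 1)).getD c 0 = (rest.count c : Int) := by
        intro c
        rw [PySem.Dict.getD_insert]
        by_cases hcc : c = ch
        · subst hcc
          rw [if_pos rfl, hc c]
          simp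
        · rw [if_neg hcc, hc c]
          norm_cast
          have hne : ch ≠ c := fun h => hcc h.symm
          simp [hne]
      by_cases hmem : ch ∈ st
      · have hcon : PySem.Set.contains seen ch = true :=
          (PySem.Set.contains_iff _ _).mpr ((hs ch).mpr hmem)
        simp only [aStep, hcon, if_pos hmem]
        exact ih _ _ _ hc' hs hn
      · have hcon : PySem.Set.contains seen ch = false := by
          rw [Bool.eq_false_iff]
          intro h
          exact hmem ((hs ch).mp ((PySem.Set.contains_iff _ _).mp h))
        obtain ⟨hp2, hp1⟩ := aPop_eq ch (cnt.insert ch (cnt.getD ch 0 - 1)) rest st seen hc' hs hn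
        simp only [aStep, hcon, if_neg hmem, Bool.false_eq_true, if_false]
        rw [hp2]
        apply ih
        · exact hc'
        · intro x
          rw [PySem.Set.mem_add, hp1 x, List.mem_cons]
          tauto
        · rw [List.nodup_cons]
          refine ⟨fun h => hmem ((mPop_sublist ch rest st).mem h), ?_⟩
          exact (mPop_sublist ch rest st).nodup hn

lemma solution_eq_mRun (s : String) :
    solution s = String.ofList (mRun s.toList []).reverse := by
  unfold solution
  simp only []
  congr 1
  rw [fold_eq]
  · intro c
    exact_mod_cast PySem.Dict.getD_counter s.toList c
  · intro x; simp [PySem.Set.empty]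
  · exact List.nodup_nil

-- ----- characterisation of B's selection loop -----
-- after the scan, c = l[p] is the smallest character of l[0..k] (leftmost on
-- ties), where k is the first index whose character has no later occurrence
lemma bSel_spec : ∀ (rem l : List Char) (i bi : Nat) (bc : Char),
    rem = l.drop i → i < l.length → bi ≤ i → bi < l.length → l.getD bi ' ' = bc →
    (∀ j, j < bi → bc < l.getD j ' ') →
    (∀ j, bi ≤ j → j < i → ¬ l.getD j ' ' < bc) →
    (∀ j, j < i → l.getD j ' ' ∈ l.drop (j + 1)) →
    ∃ k, k < l.length ∧ i - 1 ≤ k ∧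
      (bSel rem bc bi i).2 ≤ k ∧ (bSel rem bc bi i).2 < l.length ∧
      l.getD (bSel rem bc bi i).2 ' ' = (bSel rem bc bi i).1 ∧
      (∀ j, j < (bSel rem bc bi i).2 → (bSel rem bc bi i).1 < l.getD j ' ') ∧
      (∀ j, j ≤ k → ¬ l.getD j ' ' < (bSel rem bc bi i).1) ∧
      l.getD k ' ' ∉ l.drop (k + 1) ∧
      (∀ j, j < k → l.getD j ' ' ∈ l.drop (j + 1)) := by
  intro rem
  induction rem with
  | nil =>
      intro l i bi bc hrem hi _ _ _ _ _ _
      exfalso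
      have := List.drop_eq_getElem_cons hi
      rw [← hrem] at this
      simp at this
      omega
  | cons ch rest ih =>
      intro l i bi bc hrem hi hbile hbi hbc hB1 hB2 hB3
      have hd := List.drop_eq_getElem_cons hi
      rw [hd] at hrem
      injection hrem with h1 h2
      have hgi : l.getD i ' ' = ch := by
        rw [List.getD_eq_getElem l ' ' hi, ← h1]
      simp only [bSel]
      by_cases hmem : ch ∈ rest
      · -- no break: continue scanning
        have hi1 : i + 1 < l.length := by
          by_contra hcon
          have : l.drop (i + 1) = [] := List.drop_eq_nil_of_le (by omega)
          rw [← h2] at this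
          exact List.ne_nil_of_mem hmem this
        have hB3' : ∀ j, j < i + 1 → l.getD j ' ' ∈ l.drop (j + 1) := by
          intro j hji
          rcases Nat.lt_succ_iff_lt_or_eq.mp hji with h | rfl
          · exact hB3 j h
          · rw [hgi, ← h2]; exact hmem
        rw [if_pos hmem]
        by_cases hlt : ch < bc
        · simp only [if_pos hlt]
          have hB1' : ∀ j, j < i → ch < l.getD j ' ' := by
            intro j hji
            by_cases hjb : j < bi
            · exact lt_trans hlt (hB1 j hjb)
            · exact lt_of_lt_of_le hlt (le_of_not_gt (hB2 j (le_of_not_gt hjb) hji))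
          obtain ⟨k, hk, hik, rest'⟩ :=
            ih l (i + 1) i ch h2 hi1 (by omega) hi hgi hB1'
              (by intro j hij hji
                  have : j = i := by omega
                  subst this
                  rw [hgi]
                  exact lt_irrefl ch)
              hB3'
          exact ⟨k, hk, by omega, rest'⟩
        · simp only [if_neg hlt]
          obtain ⟨k, hk, hik, rest'⟩ :=
            ih l (i + 1) bi bc h2 hi1 (by omega) hbi hbc hB1
              (by intro j hij hji
                  rcases Nat.lt_succ_iff_lt_or_eq.mp hji with h | rfl
                  · exact hB2 j hij h
                  · rw [hgi]; exact hlt)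
              hB3'
          exact ⟨k, hk, by omega, rest'⟩
      · -- break at index i (ch has no later occurrence)
        rw [if_neg hmem]
        have hnotin : l.getD i ' ' ∉ l.drop (i + 1) := by
          rw [hgi, ← h2]
          exact hmem
        by_cases hlt : ch < bc
        · simp only [if_pos hlt]
          have hB1' : ∀ j, j < i → ch < l.getD j ' ' := by
            intro j hji
            by_cases hjb : j < bi
            · exact lt_trans hlt (hB1 j hjb)
            · exact lt_of_lt_of_le hlt (le_of_not_gt (hB2 j (le_of_not_gt hjb) hji))
          refine ⟨i, hi, by omega, le_refl _, hi, hgi, hB1', ?_, hnotin, hB3⟩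
          intro j hji
          rcases Nat.lt_succ_iff_lt_or_eq.mp (Nat.lt_succ_of_le hji) with h | rfl
          · exact lt_asymm (hB1' j h)
          · rw [hgi]; exact lt_irrefl ch
        · simp only [if_neg hlt]
          refine ⟨i, hi, by omega, hbile, hbi, hbc, hB1, ?_, hnotin, hB3⟩
          intro j hji
          rcases Nat.lt_succ_iff_lt_or_eq.mp (Nat.lt_succ_of_le hji) with h | rfl
          · by_cases hjb : j < bi
            · exact lt_asymm (hB1 j hjb)
            · exact hB2 j (le_of_not_gt hjb) h
          · rw [hgi]; exact hlt

-- every element left of p reoccurs strictly after p (via its last occurrence)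
lemma last_occ (x : Char) (l : List Char) (hx : x ∈ l) :
    ∃ j, ∃ hj : j < l.length, l[j] = x ∧ x ∉ l.drop (j + 1) := by
  induction l with
  | nil => simp at hx
  | cons a t ih =>
      by_cases hxt : x ∈ t
      · obtain ⟨j, hj, hjx, hnd⟩ := ih hxt
        exact ⟨j + 1, by simpa using Nat.succ_lt_succ hj, by simpa using hjx, by simpa using hnd⟩
      · rcases List.mem_cons.mp hx with rfl | h
        · exact ⟨0, by simp, by simp, by simpa using hxt⟩
        · exact absurd h hxt

-- ----- the run on u ++ c :: v collapses to [c] when every element of u is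
-- larger than c and reoccurs in v -----
lemma mPop_all (c : Char) (v st : List Char) (h : ∀ x ∈ st, c < x ∧ x ∈ v) :
    mPop c v st = [] := by
  induction st with
  | nil => simp [mPop]
  | cons top st ih =>
      have htop := h top (by simp)
      simp only [mPop, if_pos htop]
      exact ih fun x hx => h x (by simp [hx])

lemma mRun_prefix (c : Char) (v : List Char) : ∀ (u st : List Char),
    (∀ x ∈ u, c < x ∧ x ∈ v) → (∀ x ∈ st, c < x ∧ x ∈ v) →
    mRun (u ++ c :: v) st = mRun v [c] := by
  intro u
  induction u with
  | nil =>
      intro st _ hst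
      have hc : c ∉ st := fun h => lt_irrefl c (hst c h).1
      simp only [List.nil_append, mRun, if_neg hc, mPop_all c v st hst]
  | cons a u ih =>
      intro st hu hst
      simp only [List.cons_append, mRun]
      have ha := hu a (by simp)
      split
      · exact ih _ (fun x hx => hu x (by simp [hx])) hst
      · refine ih _ (fun x hx => hu x (by simp [hx])) ?_
        intro x hx
        rcases List.mem_cons.mp hx with rfl | hx'
        · exact ha
        · exact hst x ((mPop_sublist _ _ _).mem hx')

-- ----- simulation: with c at the bottom of the stack and a guard that keeps c
-- from ever being popped, the run equals the run on the c-filtered input -----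
def Guard (c : Char) (w zs : List Char) : Prop :=
  (∃ e ∈ zs, e ∉ w) ∨
  (∃ u2 e v2, w = u2 ++ e :: v2 ∧ (∀ x ∈ u2, ¬ x < c) ∧ ¬ e < c ∧ e ∉ v2) ∨
  c ∉ w

lemma mPop_append_c (c ch : Char) (rest : List Char) : ∀ zs : List Char,
    (¬ ch < c ∨ c ∉ rest ∨ ∃ e ∈ zs, e ∉ rest) →
    mPop ch rest (zs ++ [c]) = mPop ch rest zs ++ [c] := by
  intro zs hg
  induction zs with
  | nil =>
      simp only [List.nil_append, mPop]
      have : ¬ (ch < c ∧ c ∈ rest) := by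
        rcases hg with h | h | ⟨e, he, _⟩
        · exact fun hh => h hh.1
        · exact fun hh => h hh.2
        · simp at he
      rw [if_neg this]
  | cons top zs ih =>
      simp only [List.cons_append, mPop]
      split
      · apply ih
        rcases hg with h | h | ⟨e, he, hr⟩
        · exact Or.inl h
        · exact Or.inr (Or.inl h)
        · rcases List.mem_cons.mp he with rfl | he'
          · rename_i hcond; exact absurd hcond.2 hr
          · exact Or.inr (Or.inr ⟨e, he', hr⟩)
      · rfl

lemma mPop_filter (c ch : Char) (rest : List Char) : ∀ zs : List Char, c ∉ zs →
    mPop ch (rest.filter (fun x => x ≠ c)) zs = mPop ch rest zs := by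
  intro zs
  induction zs with
  | nil => intro _; simp [mPop]
  | cons top zs ih =>
      intro hc
      have htop : top ≠ c := fun h => hc (h ▸ List.mem_cons_self)
      have hmem : (top ∈ rest.filter (fun x => x ≠ c)) ↔ top ∈ rest := by
        simp [List.mem_filter, htop]
      simp only [mPop, hmem]
      split
      · exact ih fun h => hc (List.mem_cons_of_mem _ h)
      · rfl

lemma mPop_mem_keep (ch : Char) (rest : List Char) (e : Char) : ∀ zs : List Char,
    e ∈ zs → e ∉ rest → e ∈ mPop ch rest zs := by
  intro zs hz hr
  induction zs with
  | nil => simp at hz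
  | cons top zs ih =>
      simp only [mPop]
      split
      · rcases List.mem_cons.mp hz with rfl | hz'
        · rename_i hcond; exact absurd hcond.2 hr
        · exact ih hz'
      · exact hz

lemma mRun_sim (c : Char) : ∀ (w zs : List Char), c ∉ zs → Guard c w zs →
    mRun w (zs ++ [c]) = mRun (w.filter (fun x => x ≠ c)) zs ++ [c] := by
  intro w
  induction w with
  | nil => intro zs _ _; simp [mRun]
  | cons ch w ih =>
      intro zs hcz hg
      by_cases hch : ch = c
      · -- a later occurrence of c: skipped on the left, filtered on the right
        subst hch
        have hmem : ch ∈ zs ++ [ch] := by simp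
        have hfilter : (ch :: w).filter (fun x => x ≠ ch) = w.filter (fun x => x ≠ ch) := by
          simp
        rw [hfilter]
        simp only [mRun, if_pos hmem]
        apply ih zs hcz
        -- new guard for w
        rcases hg with ⟨e, he, hew⟩ | ⟨u2, e, v2, hw, hu2, hec, hev⟩ | hnw
        · exact Or.inl ⟨e, he, fun h => hew (List.mem_cons_of_mem _ h)⟩
        · rcases u2 with _ | ⟨b, u2'⟩
          · -- e = ch = c, hence c ∉ w
            simp only [List.nil_append, List.cons.injEq] at hw
            exact Or.inr (Or.inr (hw.1 ▸ hw.2 ▸ hev))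
          · simp only [List.cons_append, List.cons.injEq] at hw
            exact Or.inr (Or.inl ⟨u2', e, v2, hw.2, fun x hx => hu2 x (by simp [hx]), hec, hev⟩)
        · exact absurd List.mem_cons_self hnw
      · -- ch ≠ c
        have hmem_iff : ch ∈ zs ++ [c] ↔ ch ∈ zs := by simp [hch]
        have hguard : ¬ ch < c ∨ c ∉ w ∨ ∃ e ∈ zs, e ∉ w := by
          rcases hg with ⟨e, he, hew⟩ | ⟨u2, e, v2, hw, hu2, hec, hev⟩ | hnw
          · exact Or.inr (Or.inr ⟨e, he, fun h => hew (List.mem_cons_of_mem _ h)⟩)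
          · rcases u2 with _ | ⟨b, u2'⟩
            · simp only [List.nil_append, List.cons.injEq] at hw
              exact Or.inl (hw.1 ▸ hec)
            · simp only [List.cons_append, List.cons.injEq] at hw
              exact Or.inl (hw.1 ▸ hu2 b (by simp))
          · exact Or.inr (Or.inl fun h => hnw (List.mem_cons_of_mem _ h))
        have hfw : (ch :: w).filter (fun x => x ≠ c) = ch :: w.filter (fun x => x ≠ c) := by
          simp [hch]
        rw [hfw]
        by_cases hin : ch ∈ zs
        · -- skipped on both sides
          simp only [mRun, if_pos (hmem_iff.mpr hin), if_pos hin]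
          apply ih zs hcz
          rcases hg with ⟨e, he, hew⟩ | ⟨u2, e, v2, hw, hu2, hec, hev⟩ | hnw
          · exact Or.inl ⟨e, he, fun h => hew (List.mem_cons_of_mem _ h)⟩
          · rcases u2 with _ | ⟨b, u2'⟩
            · simp only [List.nil_append, List.cons.injEq] at hw
              exact Or.inl ⟨ch, hin, hw.2 ▸ hw.1 ▸ hev⟩
            · simp only [List.cons_append, List.cons.injEq] at hw
              exact Or.inr (Or.inl ⟨u2', e, v2, hw.2, fun x hx => hu2 x (by simp [hx]), hec, hev⟩)
          · exact Or.inr (Or.inr fun h => hnw (List.mem_cons_of_mem _ h))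
        · -- pushed on both sides
          simp only [mRun, if_neg (fun h => hin (hmem_iff.mp h)), if_neg hin]
          rw [mPop_append_c c ch w zs hguard, mPop_filter c ch w zs hcz]
          have hcz' : c ∉ ch :: mPop ch w zs := by
            intro h
            rcases List.mem_cons.mp h with h' | h'
            · exact hch h'.symm
            · exact hcz ((mPop_sublist _ _ _).mem h')
          apply ih _ hcz'
          rcases hg with ⟨e, he, hew⟩ | ⟨u2, e, v2, hw, hu2, hec, hev⟩ | hnw
          · refine Or.inl ⟨e, ?_, fun h => hew (List.mem_cons_of_mem _ h)⟩
            exact List.mem_cons_of_mem _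
              (mPop_mem_keep ch w e zs he (fun h => hew (List.mem_cons_of_mem _ h)))
          · rcases u2 with _ | ⟨b, u2'⟩
            · simp only [List.nil_append, List.cons.injEq] at hw
              exact Or.inl ⟨ch, List.mem_cons_self, hw.2 ▸ hw.1 ▸ hev⟩
            · simp only [List.cons_append, List.cons.injEq] at hw
              exact Or.inr (Or.inl ⟨u2', e, v2, hw.2, fun x hx => hu2 x (by simp [hx]), hec, hev⟩)
          · exact Or.inr (Or.inr fun h => hnw (List.mem_cons_of_mem _ h))

-- ----- the abstract run satisfies B's greedy recurrence -----
lemma mRun_greedy (l : List Char) (a : Char) (t : List Char) (hl : l = a :: t) :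
    mRun l [] =
      mRun ((t.drop (bSel l a 0 0).2).filter (fun x => x ≠ (bSel l a 0 0).1)) []
        ++ [(bSel l a 0 0).1] := by
  have hlen : 0 < l.length := by rw [hl]; simp
  obtain ⟨k, hk, _, hpk, hp, hpc, hB, hC, hD, hE⟩ :=
    bSel_spec l l 0 0 a rfl hlen (le_refl 0) hlen (by rw [hl]; rfl)
      (fun j hj => absurd hj (Nat.not_lt_zero _))
      (fun j _ hj => absurd hj (Nat.not_lt_zero _))
      (fun j hj => absurd hj (Nat.not_lt_zero _))
  set p := (bSel l a 0 0).2 with hpdef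
  set c := (bSel l a 0 0).1 with hcdef
  have hc' : l[p]'hp = c := by rw [← List.getD_eq_getElem l ' ' hp]; exact hpc
  have hsplit : l = l.take p ++ c :: l.drop (p + 1) := by
    conv_lhs => rw [← List.take_append_drop p l]
    congr 1
    rw [List.drop_eq_getElem_cons hp, hc']
  have htake : ∀ x ∈ l.take p, c < x ∧ x ∈ l.drop (p + 1) := by
    intro x hx
    obtain ⟨j, hj, hjx⟩ := List.mem_iff_getElem.mp hx
    have hjp : j < p := by
      have := hj
      simp [List.length_take] at this
      exact this.1
    have hjl : j < l.length := by omega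
    have hx' : l[j]'hjl = x := by rw [← hjx, List.getElem_take]
    have hcx : c < x := by
      have := hB j hjp
      rwa [List.getD_eq_getElem l ' ' hjl, hx'] at this
    refine ⟨hcx, ?_⟩
    obtain ⟨jl, hjl2, hjlx, hnd⟩ := last_occ x l ((List.take_sublist p l).mem hx)
    have hkjl : k ≤ jl := by
      by_contra hcon
      rw [Nat.not_le] at hcon
      apply hnd
      have := hE jl hcon
      rwa [List.getD_eq_getElem l ' ' hjl2, hjlx] at this
    have hjlp : jl ≠ p := by
      intro heq
      have hgd : l.getD jl ' ' = x := by
        rw [List.getD_eq_getElem l ' ' hjl2]; exact hjlx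
      rw [heq, hpc] at hgd
      rw [← hgd] at hcx
      exact lt_irrefl c hcx
    have hge : p + 1 ≤ jl := by omega
    refine List.mem_iff_getElem.mpr ⟨jl - (p + 1), ?_, ?_⟩
    · simp [List.length_drop]; omega
    · rw [List.getElem_drop]
      have : p + 1 + (jl - (p + 1)) = jl := by omega
      simp only [this]
      exact hjlx
  conv_lhs => rw [hsplit]
  rw [mRun_prefix c (l.drop (p + 1)) (l.take p) [] htake (by simp)]
  have hguard : Guard c (l.drop (p + 1)) [] := by
    by_cases hpk' : p = k
    · right; right
      intro hcmem
      apply hD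
      have hck : l.getD k ' ' = c := by rw [← hpk']; exact hpc
      rw [hck, ← hpk']
      exact hcmem
    · right; left
      have hpk2 : p + 1 ≤ k := by omega
      refine ⟨(l.drop (p + 1)).take (k - (p + 1)), l[k]'hk, l.drop (k + 1), ?_, ?_, ?_, ?_⟩
      · conv_lhs => rw [← List.take_append_drop (k - (p + 1)) (l.drop (p + 1))]
        congr 1
        rw [List.drop_drop]
        have : p + 1 + (k - (p + 1)) = k := by omega
        rw [this, List.drop_eq_getElem_cons hk]
      · intro x hx
        obtain ⟨j, hj, hjx⟩ := List.mem_iff_getElem.mp hx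
        have hjlt : j < k - (p + 1) ∧ p + 1 + j < l.length := by
          simp [List.length_take, List.length_drop] at hj
          omega
        have hx' : l[p + 1 + j]'hjlt.2 = x := by
          rw [← hjx, List.getElem_take, List.getElem_drop]
        have := hC (p + 1 + j) (by omega)
        rwa [List.getD_eq_getElem l ' ' hjlt.2, hx'] at this
      · have := hC k (le_refl k)
        rwa [List.getD_eq_getElem l ' ' hk] at this
      · have := hD
        rwa [List.getD_eq_getElem l ' ' hk] at this
  have hsim := mRun_sim c (l.drop (p + 1)) [] (by simp) hguard
  rw [List.nil_append] at hsim
  rw [hsim]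
  have hw : l.drop (p + 1) = t.drop p := by rw [hl, List.drop_succ_cons]
  rw [hw]

lemma bRec_eq_mRun : ∀ (l : List Char), bRec l = (mRun l []).reverse := by
  intro l
  induction l using bRec.induct with
  | case1 => rw [bRec]; rfl
  | case2 a t cp ih =>
      rw [bRec, mRun_greedy (a :: t) a t rfl]
      simp only [List.reverse_append, List.reverse_cons, List.reverse_nil, List.nil_append,
        List.singleton_append]
      rw [ih]

-- ===== VERDICT (by name: the statement is the Claim_ definition above) =====
theorem solution_spec : Claim_equal_solution := by
  intro s _
  unfold Spec_solution solution_alt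
  rw [solution_eq_mRun, bRec_eq_mRun]
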